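-- pv_equiv track=rewrite | github.com/theonlyshanmukh/Multi-Function-Calculator | calculator.py | factor_sqrt
-- ===== SOURCE A (Python) =====
-- import math
--
-- def factor_sqrt(n):
--     if n < 0:
--         return (None, None)
--     max_k = 0
--     m = n
--     for i in range(int(math.isqrt(n)), 0, -1):
--         if n % (i*i) == 0:
--             max_k = i
--             m = n // (i*i)
--             break
--     return (max_k, m)
-- ===== SOURCE B (Python) =====
-- def factor_sqrt(n):
--     if n < 0:
--         return (None, None)
--     if n == 0:
--         return (0, 0)
--     k = 1
--     m = n
--     d = 2
--     while d * d <= m: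
--         e = 0
--         while m % d == 0:
--             m //= d
--             e += 1
--         k *= d ** (e // 2)
--         d += 1
--     return (k, n // (k * k))
-- ===== Notes on version B (the rewrite author's own statement) =====
-- stated objective: alternative
-- what changed: A scans candidates i downward from isqrt(n) testing n % (i*i) == 0 until the first hit; B instead factors n by trial division, accumulating d**(e//2) for each found factor d with exponent e, and returns that product k with n // (k*k).
import Mathlib
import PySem

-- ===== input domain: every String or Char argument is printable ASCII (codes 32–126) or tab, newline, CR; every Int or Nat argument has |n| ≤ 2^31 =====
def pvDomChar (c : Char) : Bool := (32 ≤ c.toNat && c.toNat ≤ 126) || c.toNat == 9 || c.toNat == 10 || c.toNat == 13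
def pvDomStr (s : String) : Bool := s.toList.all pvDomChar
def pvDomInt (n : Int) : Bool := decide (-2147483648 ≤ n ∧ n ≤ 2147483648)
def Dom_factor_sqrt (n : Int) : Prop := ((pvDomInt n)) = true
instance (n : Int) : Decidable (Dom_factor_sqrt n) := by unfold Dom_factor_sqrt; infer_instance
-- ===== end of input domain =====

-- B replaces A's descending scan of candidates i ≤ isqrt(n) by trial-division
-- factoring that accumulates d^(e//2) for each prime power d^e of n.

-- ===== PORT A =====
-- the for-loop `for i in range(isqrt(n), 0, -1)` with `break`, as structural
-- recursion on the (nonnegative) counter; the pair returned is (max_k, m).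
-- For n ≥ 0 Python's % and // on the nonnegative operands coincide with Nat's,
-- and math.isqrt coincides with Nat.sqrt, so the Nat arithmetic here is exact.
def aLoop (N : Nat) : Nat → Nat × Nat
  | 0 => (0, N)                            -- loop exhausted without a hit
  | (i+1) => if N % ((i+1)*(i+1)) = 0 then (i+1, N / ((i+1)*(i+1))) else aLoop N i

def factor_sqrt (n : Int) : Option Int × Option Int :=
  if n < 0 then (none, none)
  else
    let N := n.toNat
    let r := aLoop N (Nat.sqrt N)
    (some (r.1 : Int), some (r.2 : Int))

-- ===== PORT B =====
-- inner `while m % d == 0: m //= d; e += 1`; returns (e, m').  The guards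
-- 2 ≤ d and 0 < m only totalize the recursion: every call site satisfies them.
def divOut (d m : Nat) : Nat × Nat :=
  if h : 2 ≤ d ∧ d ∣ m ∧ 0 < m then
    let r := divOut d (m / d)
    (r.1 + 1, r.2)
  else (0, m)
  termination_by m
  decreasing_by exact Nat.div_lt_self h.2.2 h.1

theorem divOut_snd_le (d m : Nat) : (divOut d m).2 ≤ m := by
  induction m using divOut.induct d with
  | case1 m h ih =>
    rw [divOut, dif_pos h]
    exact le_trans ih (Nat.div_le_self _ _)
  | case2 m h => rw [divOut, dif_neg h]

-- outer `while d * d <= m`, carrying the accumulator k; again 2 ≤ d is only a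
-- totalization guard (d starts at 2 and only grows).
def bLoop (m d k : Nat) : Nat :=
  if h : 2 ≤ d ∧ d * d ≤ m then
    let r := divOut d m
    bLoop r.2 (d+1) (k * d ^ (r.1 / 2))
  else k
  termination_by m + 1 - d
  decreasing_by
    have h1 : (divOut d m).2 ≤ m := divOut_snd_le d m
    have h2 : d < m := lt_of_lt_of_le (by nlinarith [h.1] : d < d * d) h.2
    omega

def factor_sqrt_alt (n : Int) : Option Int × Option Int :=
  if n < 0 then (none, none)
  else if n = 0 then (some 0, some 0)
  else
    let N := n.toNat
    let k := bLoop N 2 1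
    (some (k : Int), some ((N / (k * k) : Nat) : Int))

-- ===== PRECONDITION & SPEC =====
def Spec_factor_sqrt (n : Int) (out : Option Int × Option Int) : Prop := out = factor_sqrt_alt n
instance (n : Int) (out : Option Int × Option Int) : Decidable (Spec_factor_sqrt n out) := by unfold Spec_factor_sqrt; infer_instance

-- ===== CLAIM (what is proved, stated in full; the proofs are below) =====
def Claim_equal_factor_sqrt : Prop := ∀ (n : Int), Dom_factor_sqrt n → Spec_factor_sqrt n (factor_sqrt n)

-- ===== LEMMAS AND PROOFS =====

-- divOut d m returns (e, m') with m = d^e * m' and d ∤ m' (for 2 ≤ d, 0 < m)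
theorem divOut_spec (d : Nat) (hd : 2 ≤ d) : ∀ m, 0 < m →
    m = d ^ (divOut d m).1 * (divOut d m).2 ∧ ¬ d ∣ (divOut d m).2 ∧ 0 < (divOut d m).2 := by
  intro m
  induction m using divOut.induct d with
  | case1 m h ih =>
    intro _
    rw [divOut, dif_pos h]
    obtain ⟨hd2, hdvd, hm0⟩ := h
    have hmd : 0 < m / d := Nat.div_pos (Nat.le_of_dvd hm0 hdvd) (by omega)
    obtain ⟨heq, hnd, hpos⟩ := ih hmd
    refine ⟨?_, hnd, hpos⟩
    calc m = d * (m / d) := by rw [Nat.mul_div_cancel' hdvd]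
      _ = d * (d ^ (divOut d (m/d)).1 * (divOut d (m/d)).2) := by rw [← heq]
      _ = d ^ ((divOut d (m/d)).1 + 1) * (divOut d (m/d)).2 := by ring
  | case2 m h =>
    intro hm
    rw [divOut, dif_neg h]
    have hnd : ¬ d ∣ m := fun hdvd => h ⟨hd, hdvd, hm⟩
    exact ⟨by simp, hnd, hm⟩

-- key uniqueness lemma: if N = (stuff) with K² ∣ N and N/K² squarefree, any j with j² ∣ N divides K
theorem dvd_of_sq_dvd (K N j : Nat) (hN : 0 < N) (hK : K * K ∣ N)
    (hsf : Squarefree (N / (K * K))) (hj : j * j ∣ N) : j ∣ K := by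
  have hK0 : K ≠ 0 := by rintro rfl; simp at hK; omega
  have hj0 : j ≠ 0 := by rintro rfl; simp at hj; omega
  have hN0 : N ≠ 0 := by omega
  rw [← Nat.factorization_le_iff_dvd hj0 hK0, Finsupp.le_def]
  intro p
  have hdvd : (j * j).factorization p ≤ N.factorization p :=
    Finsupp.le_def.1 ((Nat.factorization_le_iff_dvd (by positivity) hN0).2 hj) p
  have hNeq : N = K * K * (N / (K * K)) := (Nat.mul_div_cancel' hK).symm
  have hb0 : N / (K * K) ≠ 0 := hsf.ne_zero
  have hfact : N.factorization p = (K * K).factorization p + (N / (K*K)).factorization p := by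
    conv_lhs => rw [hNeq]
    rw [Nat.factorization_mul (by positivity) hb0]; simp
  have hsf1 : (N / (K * K)).factorization p ≤ 1 := Squarefree.natFactorization_le_one p hsf
  have hjj : (j * j).factorization p = 2 * j.factorization p := by
    rw [Nat.factorization_mul hj0 hj0]; simp [two_mul]
  have hKK : (K * K).factorization p = 2 * K.factorization p := by
    rw [Nat.factorization_mul hK0 hK0]; simp [two_mul]
  omega

-- bLoop computes k * w where w² ∣ m and m / w² is squarefree,
-- provided m has no prime factor below d.
theorem bLoop_spec (m d k : Nat) (hd : 2 ≤ d) (hm : 0 < m)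
    (hp : ∀ p, Nat.Prime p → p ∣ m → d ≤ p) :
    ∃ w, 0 < w ∧ bLoop m d k = k * w ∧ w * w ∣ m ∧ Squarefree (m / (w * w)) := by
  induction m, d, k using bLoop.induct with
  | case1 m d k h r ih =>
    obtain ⟨hd2, hdm⟩ := h
    obtain ⟨heq, hnd, hpos⟩ := divOut_spec d hd2 m hm
    set e := (divOut d m).1 with he
    set m' := (divOut d m).2 with hm'
    -- prime factors of m' are ≥ d+1
    have hm'dvd : m' ∣ m := ⟨d ^ e, by rw [heq]; ring⟩
    have hp' : ∀ p, Nat.Prime p → p ∣ m' → d + 1 ≤ p := by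
      intro p hpp hpdvd
      have h1 : d ≤ p := hp p hpp (hpdvd.trans hm'dvd)
      rcases Nat.lt_or_ge d p with h2 | h2
      · omega
      · have : p = d := le_antisymm h2 h1
        exact absurd (this ▸ hpdvd) hnd
    obtain ⟨w', hw'0, hbe, hw'dvd, hw'sf⟩ := ih (by omega) hpos hp'
    rw [bLoop, dif_pos (⟨hd2, hdm⟩ : 2 ≤ d ∧ d * d ≤ m)]
    refine ⟨d ^ (e / 2) * w', by positivity, ?_, ?_, ?_⟩
    · rw [hbe]; ring
    · -- (d^(e/2) * w')² ∣ d^e * m'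
      rw [heq]
      obtain ⟨t, ht⟩ := hw'dvd
      refine ⟨d ^ (e % 2) * t, ?_⟩
      have hde : e = 2 * (e / 2) + e % 2 := (Nat.div_add_mod e 2).symm ▸ by omega
      calc d ^ e * m' = d ^ (2 * (e/2) + e % 2) * (w' * w' * t) := by rw [← hde, ht]
        _ = d ^ (e/2) * w' * (d ^ (e/2) * w') * (d ^ (e % 2) * t) := by
            rw [pow_add, pow_mul]; ring
    · -- squarefreeness of m / w²
      obtain ⟨t, ht⟩ := hw'dvd
      have hwpos : 0 < d ^ (e / 2) * w' := by positivity
      have hde : e = 2 * (e / 2) + e % 2 := by omega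
      have hmsplit : m = (d ^ (e/2) * w') * (d ^ (e/2) * w') * (d ^ (e % 2) * t) := by
        rw [heq, ht]
        conv_lhs => rw [hde]
        rw [pow_add, pow_mul]; ring
      have hdivt : m / ((d ^ (e/2) * w') * (d ^ (e/2) * w')) = d ^ (e % 2) * t := by
        rw [hmsplit, Nat.mul_div_cancel_left _ (by positivity)]
      rw [hdivt]
      have htsf : Squarefree t := by
        have : m' / (w' * w') = t := by rw [ht, Nat.mul_div_cancel_left _ (by positivity)]
        rwa [this] at hw'sf
      rcases Nat.mod_two_eq_zero_or_one e with h0 | h1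
      · simpa [h0] using htsf
      · -- e odd: d really divides m, hence d is prime; and d ∤ t
        rw [h1, pow_one]
        have hddvd : d ∣ m := by
          rw [heq]
          have hepos : 0 < e := by
            rcases Nat.eq_zero_or_pos e with h0 | h0
            · rw [h0] at h1; simp at h1
            · exact h0
          exact Dvd.dvd.mul_right (dvd_pow_self d (by omega)) m'
        have hdprime : Nat.Prime d := by
          by_contra hnp
          obtain ⟨q, hq, hqd⟩ := Nat.exists_prime_and_dvd (by omega : d ≠ 1)
          have hqm : q ∣ m := hqd.trans hddvd
          have h1q : d ≤ q := hp q hq hqm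
          have hqled : q ≤ d := Nat.le_of_dvd (by omega) hqd
          have : q = d := le_antisymm hqled h1q
          exact hnp (this ▸ hq)
        have hdnt : ¬ d ∣ t := by
          intro hdt
          exact hnd (hdt.trans ⟨w' * w', by rw [ht]; ring⟩)
        have hcop : Nat.Coprime d t := (Nat.Prime.coprime_iff_not_dvd hdprime).2 hdnt
        exact (Nat.squarefree_mul hcop).2 ⟨hdprime.squarefree, htsf⟩
  | case2 m d k h =>
    rw [bLoop, dif_neg h]
    refine ⟨1, one_pos, (mul_one k).symm, one_dvd _, ?_⟩
    simp only [one_mul, Nat.div_one]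
    -- d*d > m (or d < 2, impossible here) and no prime factor < d ⇒ m squarefree
    have hdm : ¬ d * d ≤ m := by
      intro hle; exact h ⟨hd, hle⟩
    rw [Nat.squarefree_iff_prime_squarefree]
    intro p hpp hpdvd
    have hpm : p ∣ m := (dvd_mul_right p p).trans hpdvd
    have hdp : d ≤ p := hp p hpp hpm
    have hppm : p * p ≤ m := Nat.le_of_dvd hm hpdvd
    have : d * d ≤ p * p := Nat.mul_le_mul hdp hdp
    omega

-- aLoop returns the greatest j ≤ i with j² ∣ N (and N / j²), for 1 ≤ i
theorem aLoop_spec (N : Nat) (i : Nat) (hi : 1 ≤ i) :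
    ∃ g, aLoop N i = (g, N / (g * g)) ∧ 1 ≤ g ∧ g ≤ i ∧ g * g ∣ N ∧
      ∀ j, j ≤ i → j * j ∣ N → j ≤ g := by
  induction i with
  | zero => omega
  | succ i ih =>
    by_cases hcase : N % ((i+1)*(i+1)) = 0
    · refine ⟨i+1, ?_, by omega, le_refl _, ?_, fun j hj _ => hj⟩
      · cases i <;> simp [aLoop, hcase]
      · exact Nat.dvd_iff_mod_eq_zero.2 hcase
    · rcases Nat.eq_zero_or_pos i with rfl | hipos
      · exfalso
        simp at hcase
        omega
      · obtain ⟨g, heq, hg1, hgi, hgdvd, hgmax⟩ := ih hipos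
        refine ⟨g, ?_, hg1, by omega, hgdvd, ?_⟩
        · cases i with
          | zero => omega
          | succ i' => simpa [aLoop, hcase] using heq
        · intro j hj hjdvd
          rcases Nat.lt_or_ge j (i+1) with h | h
          · exact hgmax j (by omega) hjdvd
          · exfalso
            have : j = i + 1 := by omega
            subst this
            exact hcase (Nat.dvd_iff_mod_eq_zero.1 hjdvd)

-- ===== VERDICT (by name: the statement is the Claim_ definition above) =====
theorem factor_sqrt_spec : Claim_equal_factor_sqrt := by
  intro n _
  unfold Spec_factor_sqrt factor_sqrt factor_sqrt_alt
  by_cases hneg : n < 0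
  · simp [hneg]
  · simp only [if_neg hneg]
    by_cases hzero : n = 0
    · subst hzero; simp [aLoop]
    · simp only [if_neg hzero]
      set N := n.toNat with hNdef
      have hN : 0 < N := by
        have : 0 < n := lt_of_le_of_ne (not_lt.1 hneg) (Ne.symm hzero)
        omega
      -- B's result
      obtain ⟨w, hw0, hbe, hwdvd, hwsf⟩ :=
        bLoop_spec N 2 1 (le_refl 2) hN (fun p hp _ => hp.two_le)
      rw [one_mul] at hbe
      -- w ≤ sqrt N
      have hwle : w ≤ Nat.sqrt N := by
        rw [Nat.le_sqrt]
        exact Nat.le_of_dvd hN hwdvd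
      have hsq1 : 1 ≤ Nat.sqrt N := le_trans hw0 hwle
      -- A's result
      obtain ⟨g, heq, hg1, hgi, hgdvd, hgmax⟩ := aLoop_spec N (Nat.sqrt N) hsq1
      -- g = w
      have hgw : g = w := by
        have h1 : w ≤ g := hgmax w hwle hwdvd
        have h2 : g ∣ w := dvd_of_sq_dvd w N g hN hwdvd hwsf hgdvd
        exact le_antisymm (Nat.le_of_dvd hw0 h2) h1
      rw [heq, hbe, hgw]
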